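-- pv_equiv track=rewrite | github.com/Akhan521/Interview-Prep | CodePath TIP-102/Unit 2/Day 2/verify_authenticity.py | is_authentic_collection
-- ===== SOURCE A (Python) =====
-- def is_authentic_collection(art_pieces):
--     if not art_pieces:
--         return False
--
--     n = max(art_pieces)
--     expected_length = n + 1
--
--     if len(art_pieces) != expected_length:
--         return False
--
--     counts = {}
--     for piece in art_pieces:
--         counts[piece] = counts.get(piece, 0) + 1
--
--     # These checks ensure that numbers 1 to n-1 appear exactly once and n appears exactly twice:
--     for i in range(1, n):
--         if counts.get(i, 0) != 1:
--             return False
--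
--     if counts.get(n, 0) != 2:
--         return False
--
--     return True
-- ===== SOURCE B (Python) =====
-- def is_authentic_collection(art_pieces):
--     if not art_pieces:
--         return False
--     n = max(art_pieces)
--     return n >= 1 and len(art_pieces) == n + 1 and sorted(art_pieces) == list(range(1, n)) + [n, n]
-- ===== Notes on version B (the rewrite author's own statement) =====
-- stated objective: simpler
-- what changed: Replaces the count-dictionary plus two verification loops with a length check and a single sort-then-compare against the canonical target list [1,...,n-1,n,n].
import Mathlib
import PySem

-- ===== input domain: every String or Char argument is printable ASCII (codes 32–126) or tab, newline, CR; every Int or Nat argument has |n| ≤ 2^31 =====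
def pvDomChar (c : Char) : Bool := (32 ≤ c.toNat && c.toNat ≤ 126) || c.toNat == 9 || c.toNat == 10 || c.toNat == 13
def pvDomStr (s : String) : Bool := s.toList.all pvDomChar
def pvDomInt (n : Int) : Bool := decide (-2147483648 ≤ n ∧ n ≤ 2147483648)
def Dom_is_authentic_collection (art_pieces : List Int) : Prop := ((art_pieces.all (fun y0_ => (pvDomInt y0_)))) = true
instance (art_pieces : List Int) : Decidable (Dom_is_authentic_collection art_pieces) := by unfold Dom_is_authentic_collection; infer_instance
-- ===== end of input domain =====

-- B replaces A's count-dictionary and verification loops by a single sort-then-compare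
-- against the canonical list [1, …, n-1, n, n] (objective: simpler; not faster).

-- ===== PORT A =====
def is_authentic_collection (art_pieces : List Int) : Bool :=
  if art_pieces = [] then false
  else
    match PySem.List.max? art_pieces (fun x => x) with
    | none => false
    | some n =>
      let expected_length : Int := n + 1
      if (art_pieces.length : Int) ≠ expected_length then false
      else
        let counts : PySem.Dict Int Int :=
          art_pieces.foldl (fun d piece => d.insert piece (d.getD piece 0 + 1)) PySem.Dict.empty
        -- 'for i in range(1, n): if …: return False' as the early-exit conjunction it computes
        if (PySem.List.pyRange 1 n 1).all (fun i => counts.getD i 0 == 1) then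
          if counts.getD n 0 ≠ 2 then false else true
        else false

-- ===== PORT B =====
def is_authentic_collection_alt (art_pieces : List Int) : Bool :=
  if art_pieces = [] then false
  else
    match PySem.List.max? art_pieces (fun x => x) with
    | none => false
    | some n =>
      decide (n ≥ 1) && (decide ((art_pieces.length : Int) = n + 1) &&
        (PySem.List.sorted art_pieces (fun x => x) false == PySem.List.pyRange 1 n 1 ++ [n, n]))

-- ===== PRECONDITION & SPEC =====
def Spec_is_authentic_collection (art_pieces : List Int) (out : Bool) : Prop := out = is_authentic_collection_alt art_pieces
instance (art_pieces : List Int) (out : Bool) : Decidable (Spec_is_authentic_collection art_pieces out) := by unfold Spec_is_authentic_collection; infer_instance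

-- ===== CLAIM (what is proved, stated in full; the proofs are below) =====
def Claim_equal_is_authentic_collection : Prop := ∀ (art_pieces : List Int), Dom_is_authentic_collection art_pieces → Spec_is_authentic_collection art_pieces (is_authentic_collection art_pieces)

-- ===== LEMMAS AND PROOFS =====

-- count of v in the canonical target list [1, …, n-1, n, n]
lemma count_range (n v : Int) :
    (PySem.List.pyRange 1 n 1).count v = if 1 ≤ v ∧ v < n then 1 else 0 := by
  by_cases hv : 1 ≤ v ∧ v < n
  · rw [if_pos hv]
    exact List.count_eq_one_of_mem (PySem.List.nodup_pyRange_one 1 n)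
      ((PySem.List.mem_pyRange_one).mpr hv)
  · rw [if_neg hv]
    exact List.count_eq_zero_of_not_mem (fun hm => hv ((PySem.List.mem_pyRange_one).mp hm))

lemma count_target (n v : Int) :
    (PySem.List.pyRange 1 n 1 ++ [n, n]).count v =
      if v = n then 2 else if 1 ≤ v ∧ v < n then 1 else 0 := by
  rw [List.count_append, count_range]
  by_cases hv : v = n
  · subst hv
    simp
  · simp [hv, Ne.symm hv]

lemma target_pairwise_le (n : Int) :
    (PySem.List.pyRange 1 n 1 ++ [n, n]).Pairwise (· ≤ ·) := by
  rw [List.pairwise_append]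
  refine ⟨(PySem.List.pairwise_lt_pyRange_one 1 n).imp (fun h => le_of_lt h), by simp, ?_⟩
  intro x hx y hy
  have := (PySem.List.mem_pyRange_one).mp hx
  have : y = n := by simpa using hy
  omega

-- core equivalence for a nonempty list with maximum n
lemma core (xs : List Int) (n : Int) (hmax : PySem.List.max? xs (fun x => x) = some n) :
    (((xs.length : Int) = n + 1) ∧
      (∀ i ∈ PySem.List.pyRange 1 n 1, (xs.count i : Int) = 1) ∧ (xs.count n : Int) = 2)
    ↔ (1 ≤ n ∧ ((xs.length : Int) = n + 1) ∧
        PySem.List.sorted xs (fun x => x) false = PySem.List.pyRange 1 n 1 ++ [n, n]) := by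
  have htlen : (PySem.List.pyRange 1 n 1 ++ [n, n]).length = (n - 1).toNat + 2 := by
    simp [PySem.List.length_pyRange_one]
  constructor
  · rintro ⟨hlen, hone, htwo⟩
    have hn1 : 1 ≤ n := by
      have h2 : xs.count n ≤ xs.length := List.count_le_length
      omega
    have hperm : (PySem.List.pyRange 1 n 1 ++ [n, n]).Perm xs := by
      rw [← Multiset.coe_eq_coe]
      refine Multiset.eq_of_le_of_card_le ?_ ?_
      · rw [Multiset.le_iff_count]
        intro a
        simp only [Multiset.coe_count]
        rw [count_target]
        by_cases ha : a = n
        · subst ha; simp; omega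
        · rw [if_neg ha]
          by_cases ha2 : 1 ≤ a ∧ a < n
          · rw [if_pos ha2]
            have := hone a ((PySem.List.mem_pyRange_one).mpr ha2)
            omega
          · rw [if_neg ha2]; exact Nat.zero_le _
      · simp only [Multiset.coe_card]
        omega
    refine ⟨hn1, hlen, ?_⟩
    exact PySem.List.sorted_id_eq_of_perm_of_pairwise _ _ hperm (target_pairwise_le n)
  · rintro ⟨hn1, hlen, hsort⟩
    have hperm : (PySem.List.pyRange 1 n 1 ++ [n, n]).Perm xs := by
      rw [← hsort]
      exact PySem.List.sorted_perm xs (fun x => x) false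
    have hcnt : ∀ v, xs.count v = (PySem.List.pyRange 1 n 1 ++ [n, n]).count v :=
      fun v => (hperm.count_eq v).symm
    refine ⟨hlen, ?_, ?_⟩
    · intro i hi
      obtain ⟨hi1, hi2⟩ := (PySem.List.mem_pyRange_one).mp hi
      rw [hcnt i, count_target, if_neg (by omega : ¬ i = n), if_pos ⟨hi1, hi2⟩]
      rfl
    · rw [hcnt n, count_target, if_pos rfl]
      rfl

-- ===== VERDICT (by name: the statement is the Claim_ definition above) =====
theorem is_authentic_collection_spec : Claim_equal_is_authentic_collection := by
  intro xs _
  unfold Spec_is_authentic_collection is_authentic_collection is_authentic_collection_alt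
  by_cases hnil : xs = []
  · simp [hnil]
  · simp only [if_neg hnil]
    cases hmax : PySem.List.max? xs (fun x => x) with
    | none => rfl
    | some n =>
      have h := core xs n hmax
      rw [Bool.eq_iff_iff]
      simp only [PySem.Dict.getD_foldl_insert_add_one, PySem.Dict.getD_empty, zero_add,
        List.all_eq_true, beq_iff_eq, Bool.and_eq_true, decide_eq_true_eq, ne_eq]
      constructor
      · intro hL
        split_ifs at hL with h1 h2 h3
        exact h.mp ⟨h1, h2, h3⟩
      · rintro ⟨h1, hl1, h2⟩
        obtain ⟨hl, hc, hn2⟩ := h.mpr ⟨h1, hl1, h2⟩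
        rw [if_neg (not_not.mpr hl), if_pos hc, if_neg (not_not.mpr hn2)]
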